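-- pv_equiv track=rewrite | github.com/meal-bot/meal-bot-ai | rag-api/scripts/parse_ingredients.py | find_last_paren
-- ===== SOURCE A (Python) =====
-- def find_last_paren(text: str) -> tuple[str, str] | None:
--     """마지막 짝 맞는 괄호의 (앞부분, 괄호내용) 반환. 없으면 None."""
--     if not text.endswith(")"):
--         return None
--     depth = 0
--     for i in range(len(text) - 1, -1, -1):
--         ch = text[i]
--         if ch == ")":
--             depth += 1
--         elif ch == "(":
--             depth -= 1
--             if depth == 0:
--                 return text[:i].rstrip(), text[i + 1:-1].strip()
--     return None
-- ===== SOURCE B (Python) =====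
-- def find_last_paren(text: str) -> tuple[str, str] | None:
--     """마지막 짝 맞는 괄호의 (앞부분, 괄호내용) 반환. 없으면 None."""
--     if not text.endswith(")"):
--         return None
--     stack = []
--     for i, ch in enumerate(text[:-1]):
--         if ch == "(":
--             stack.append(i)
--         elif ch == ")":
--             if stack:
--                 stack.pop()
--     if not stack:
--         return None
--     j = stack[-1]
--     return text[:j].rstrip(), text[j + 1:-1].strip()
-- ===== Notes on version B (the rewrite author's own statement) =====
-- stated objective: idiomatic
-- what changed: Replaces A's backward depth-counter scan (counting nesting from the final closing parenthesis leftwards) by a single forward pass maintaining a stack of indices of unmatched opening parentheses and reading its top.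
import Mathlib
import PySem

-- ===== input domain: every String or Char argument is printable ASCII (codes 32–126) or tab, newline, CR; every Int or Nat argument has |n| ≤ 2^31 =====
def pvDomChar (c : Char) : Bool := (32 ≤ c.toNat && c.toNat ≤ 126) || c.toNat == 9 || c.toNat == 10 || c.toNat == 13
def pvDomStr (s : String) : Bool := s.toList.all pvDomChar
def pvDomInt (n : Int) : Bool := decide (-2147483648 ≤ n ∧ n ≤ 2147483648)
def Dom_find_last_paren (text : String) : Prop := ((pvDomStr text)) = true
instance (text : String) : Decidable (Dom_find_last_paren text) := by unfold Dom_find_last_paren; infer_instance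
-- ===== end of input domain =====

-- B replaces A's backward depth-counting scan by a single forward pass keeping a stack of
-- indices of the unmatched opening parentheses (objective: idiomatic; same cost).

-- ===== PORT A =====
-- the backward 'for i in range(len(text)-1, -1, -1)' loop; pyGet? is always in range here,
-- so the 'none' arm is unreachable (Python never raises in this loop)
def pvAloop (text : String) (js : List Int) (depth : Int) : Option Int :=
  match js with
  | [] => none
  | i :: rest =>
    match PySem.Str.pyGet? text i with
    | none => none
    | some ch =>
      if ch = ')' then pvAloop text rest (depth + 1)
      else if ch = '(' then
        if depth - 1 = 0 then some i else pvAloop text rest (depth - 1)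
      else pvAloop text rest depth

def find_last_paren (text : String) : Option (String × String) :=
  if PySem.Str.endswith text ")" = false then none
  else
    match pvAloop text (PySem.List.pyRange ((PySem.Str.len text : Int) - 1) (-1) (-1)) 0 with
    | some i => some (PySem.Str.rstrip (PySem.Str.slice text none (some i)),
                      PySem.Str.strip (PySem.Str.slice text (some (i + 1)) (some (-1))))
    | none => none

-- ===== PORT B =====
-- one forward step of B's loop: push the index on '(', pop (drop the last) on ')' if non-empty
def pvBstep (s : List Int) (p : Int × Char) : List Int :=
  if p.2 = '(' then s ++ [p.1]
  else if p.2 = ')' then (if s ≠ [] then s.dropLast else s)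
  else s

def find_last_paren_alt (text : String) : Option (String × String) :=
  if PySem.Str.endswith text ")" = false then none
  else
    let stack :=
      (PySem.List.enumerate (PySem.Str.slice text none (some (-1))).toList 0).foldl pvBstep []
    match stack.getLast? with
    | none => none
    | some j => some (PySem.Str.rstrip (PySem.Str.slice text none (some j)),
                      PySem.Str.strip (PySem.Str.slice text (some (j + 1)) (some (-1))))

-- ===== PRECONDITION & SPEC =====
def Spec_find_last_paren (text : String) (out : Option (String × String)) : Prop := out = find_last_paren_alt text
instance (text : String) (out : Option (String × String)) : Decidable (Spec_find_last_paren text out) := by unfold Spec_find_last_paren; infer_instance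

-- ===== CLAIM (what is proved, stated in full; the proofs are below) =====
def Claim_equal_find_last_paren : Prop := ∀ (text : String), Dom_find_last_paren text → Spec_find_last_paren text (find_last_paren text)

-- ===== LEMMAS AND PROOFS =====

-- proof-side mirror of A's loop over the reversed, pre-indexed character list
def pvRloop (v : List (Int × Char)) (depth : Int) : Option Int :=
  match v with
  | [] => none
  | (i, ch) :: rest =>
    if ch = ')' then pvRloop rest (depth + 1)
    else if ch = '(' then
      if depth - 1 = 0 then some i else pvRloop rest (depth - 1)
    else pvRloop rest depth

-- proof-side front-version of B's stack step (cons/tail instead of append/dropLast)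
def pvFstep (s : List Int) (p : Int × Char) : List Int :=
  if p.2 = '(' then p.1 :: s else if p.2 = ')' then s.tail else s

theorem pvFstep_open (s : List Int) (i : Int) : pvFstep s (i, '(') = i :: s := by
  simp [pvFstep]

theorem pvFstep_close (s : List Int) (i : Int) : pvFstep s (i, ')') = s.tail := by
  simp [pvFstep]

theorem pvFstep_other (s : List Int) (i : Int) (ch : Char) (h1 : ch ≠ ')') (h2 : ch ≠ '(') :
    pvFstep s (i, ch) = s := by
  simp [pvFstep, h1, h2]

theorem dropLast_eq_rev_tail_rev (s : List Int) : s.dropLast = s.reverse.tail.reverse := by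
  cases s using List.reverseRecOn <;> simp

theorem pvBstep_eq (s : List Int) (p : Int × Char) :
    pvBstep s p = (pvFstep s.reverse p).reverse := by
  obtain ⟨i, ch⟩ := p
  by_cases h1 : ch = '('
  · subst h1; rw [pvFstep_open]; simp [pvBstep]
  · by_cases h2 : ch = ')'
    · subst h2
      rw [pvFstep_close, ← dropLast_eq_rev_tail_rev]
      by_cases hs : s = [] <;> simp [pvBstep, hs]
    · rw [pvFstep_other _ _ _ h2 h1]
      simp [pvBstep, h1, h2]

theorem pvBfold_eq (w : List (Int × Char)) (s : List Int) :
    w.foldl pvBstep s = (w.foldl pvFstep s.reverse).reverse := by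
  induction w generalizing s with
  | nil => simp
  | cons p rest ih =>
    simp only [List.foldl_cons, pvBstep_eq, ih, List.reverse_reverse]

-- the crux: A's backward depth-d search reads the (d-1)-th element of B's forward stack
theorem pvRloop_eq_stack (v : List (Int × Char)) (d : Int) (hd : 1 ≤ d) :
    pvRloop v d = (v.reverse.foldl pvFstep [])[d.toNat - 1]? := by
  induction v generalizing d with
  | nil => simp [pvRloop]
  | cons p rest ih =>
    obtain ⟨i, ch⟩ := p
    rw [List.reverse_cons, List.foldl_append, List.foldl_cons, List.foldl_nil]
    by_cases h1 : ch = ')'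
    · subst h1
      rw [pvFstep_close]
      rw [show pvRloop ((i, ')') :: rest) d = pvRloop rest (d + 1) by simp [pvRloop]]
      rw [ih (d + 1) (by omega), List.getElem?_tail]
      congr 1
      omega
    · by_cases h2 : ch = '('
      · subst h2
        rw [pvFstep_open]
        rw [show pvRloop ((i, '(') :: rest) d
            = if d - 1 = 0 then some i else pvRloop rest (d - 1) by simp [pvRloop]]
        by_cases h3 : d - 1 = 0
        · have h0 : d.toNat - 1 = 0 := by omega
          simp [h3, h0]
        · rw [if_neg h3, ih (d - 1) (by omega)]
          have hk : d.toNat - 1 = (d - 1).toNat - 1 + 1 := by omega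
          rw [hk, List.getElem?_cons_succ]
      · rw [pvFstep_other _ _ _ h1 h2]
        rw [show pvRloop ((i, ch) :: rest) d = pvRloop rest d by simp [pvRloop, h1, h2]]
        exact ih d hd

-- the two loop bodies agree step-for-step once the tails are known equal
theorem pvStep_congr (i : Int) (ch : Char) (A R : Int → Option Int)
    (h : ∀ d, A d = R d) (d : Int) :
    (if ch = ')' then A (d + 1)
     else if ch = '(' then (if d - 1 = 0 then some i else A (d - 1)) else A d)
    = (if ch = ')' then R (d + 1)
       else if ch = '(' then (if d - 1 = 0 then some i else R (d - 1)) else R d) := by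
  split_ifs <;> simp [h]

-- A's index loop over range(m-1, -1, -1) is pvRloop on the reversed enumeration of take m
theorem pvAloop_eq_rloop (text : String) (m : Nat) (hm : m ≤ text.toList.length) (d : Int) :
    pvAloop text (PySem.List.pyRange ((m : Int) - 1) (-1) (-1)) d
      = pvRloop (PySem.List.enumerate (text.toList.take m) 0).reverse d := by
  induction m generalizing d with
  | zero =>
    rw [PySem.List.pyRange_neg_one_eq_nil (by omega)]
    simp [pvAloop, pvRloop]
  | succ m ih =>
    have hm' : m < text.toList.length := by omega
    rw [show ((m + 1 : Nat) : Int) - 1 = (m : Int) by push_cast; ring]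
    rw [PySem.List.pyRange_neg_one_cons (by omega)]
    have htake : text.toList.take (m + 1) = text.toList.take m ++ [text.toList[m]] := by
      rw [List.take_add_one]
      simp [List.getElem?_eq_getElem hm']
    have hlen : (text.toList.take m).length = m := by
      rw [List.length_take]; omega
    rw [htake, PySem.List.enumerate_append, hlen]
    simp only [PySem.List.enumerate_cons, PySem.List.enumerate_nil, List.reverse_append,
      List.reverse_cons, List.reverse_nil, List.nil_append, List.cons_append, List.nil_append]
    have hA : pvAloop text ((m : Int) :: PySem.List.pyRange ((m : Int) - 1) (-1) (-1)) d
        = (if text.toList[m] = ')' then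
             pvAloop text (PySem.List.pyRange ((m : Int) - 1) (-1) (-1)) (d + 1)
           else if text.toList[m] = '(' then
             (if d - 1 = 0 then some (m : Int)
              else pvAloop text (PySem.List.pyRange ((m : Int) - 1) (-1) (-1)) (d - 1))
           else pvAloop text (PySem.List.pyRange ((m : Int) - 1) (-1) (-1)) d) := by
      conv_lhs => rw [pvAloop]
      rw [PySem.Str.pyGet?_natCast, List.getElem?_eq_getElem hm']
    have hR : pvRloop (((0 : Int) + (m : Int), text.toList[m])
          :: (PySem.List.enumerate (text.toList.take m) 0).reverse) d
        = (if text.toList[m] = ')' then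
             pvRloop (PySem.List.enumerate (text.toList.take m) 0).reverse (d + 1)
           else if text.toList[m] = '(' then
             (if d - 1 = 0 then some (m : Int)
              else pvRloop (PySem.List.enumerate (text.toList.take m) 0).reverse (d - 1))
           else pvRloop (PySem.List.enumerate (text.toList.take m) 0).reverse d) := by
      conv_lhs => rw [pvRloop]
      norm_num
    rw [hA, hR]
    exact pvStep_congr _ _ _ _ (fun d => ih (by omega) d) d

-- ===== VERDICT (by name: the statement is the Claim_ definition above) =====
theorem find_last_paren_spec : Claim_equal_find_last_paren := by
  intro text _
  unfold Spec_find_last_paren find_last_paren find_last_paren_alt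
  by_cases hend : PySem.Str.endswith text ")" = false
  · rw [if_pos hend, if_pos hend]
  · rw [Bool.not_eq_false] at hend
    rw [if_neg (by simpa using hend), if_neg (by simpa using hend)]
    have hsuf : (")" : String).toList <:+ text.toList := by
      have h := (PySem.Chars.endswith_iff (s := text.toList) (p := (")" : String).toList)).mp
      rw [← PySem.Str.endswith_eq] at h
      exact h hend
    obtain ⟨u, hu⟩ := hsuf
    have hcs : text.toList = u ++ [')'] := by simpa using hu.symm
    have hlen : (PySem.Str.len text : Int) = (text.toList.length : Int) := by
      simp [PySem.Str.len_eq]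
    -- A side: the loop result is the head of the forward stack over u
    have hA : pvAloop text (PySem.List.pyRange ((PySem.Str.len text : Int) - 1) (-1) (-1)) 0
        = ((PySem.List.enumerate u 0).foldl pvFstep []).head? := by
      rw [hlen, pvAloop_eq_rloop text text.toList.length le_rfl 0, List.take_length]
      conv_lhs => rw [hcs]
      rw [PySem.List.enumerate_append]
      simp only [PySem.List.enumerate_cons, PySem.List.enumerate_nil, List.reverse_append,
        List.reverse_cons, List.reverse_nil, List.nil_append, List.cons_append, List.nil_append]
      rw [show pvRloop (((0 : Int) + (u.length : Int), ')')
            :: (PySem.List.enumerate u 0).reverse) 0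
          = pvRloop (PySem.List.enumerate u 0).reverse (0 + 1) by rw [pvRloop]; norm_num]
      rw [show (0 : Int) + 1 = 1 by ring]
      rw [pvRloop_eq_stack _ 1 le_rfl, List.reverse_reverse]
      norm_num [List.head?_eq_getElem?]
    -- B side: the back-stack is the reverse of the front stack
    have hslice : (PySem.Str.slice text none (some (-1))).toList = u := by
      rw [PySem.Str.slice_to_neg_one, hcs]
      simp
    have hB : (PySem.List.enumerate (PySem.Str.slice text none (some (-1))).toList 0).foldl
          pvBstep [] = ((PySem.List.enumerate u 0).foldl pvFstep []).reverse := by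
      rw [hslice, pvBfold_eq]
      simp
    rw [hA, hB]
    simp only [List.getLast?_reverse]
    cases ((PySem.List.enumerate u 0).foldl pvFstep []).head? <;> rfl
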